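-- pv_equiv track=rewrite | github.com/ProbleMattic1/evennia | game/world/feedrefinery_source.py | parse_feedrefinery_source
-- ===== SOURCE A (Python) =====
-- def parse_feedrefinery_source(main: str) -> tuple[str, str]:
--     """
--     Returns (mode, rest) where mode is ``auto``, ``shared``, or ``silo``.
--
--     ``rest`` is the remainder of the argument string after the keyword, lowercased
--     and stripped (same as legacy ``feedrefinery`` parsing).
--     """
--     raw = (main or "").strip()
--     s = raw.lower()
--     for prefix in ("shared ", "plant ", "bay "):
--         if s.startswith(prefix):
--             return "shared", raw[len(prefix) :].strip().lower()
--     for prefix in ("personal ", "silo ", "mine "):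
--         if s.startswith(prefix):
--             return "silo", raw[len(prefix) :].strip().lower()
--     return "auto", s
-- ===== SOURCE B (Python) =====
-- MODE = {"shared": "shared", "plant": "shared", "bay": "shared",
--         "personal": "silo", "silo": "silo", "mine": "silo"}
--
--
-- def parse_feedrefinery_source(main: str) -> tuple[str, str]:
--     s = (main or "").strip().lower()
--     head, sep, tail = s.partition(" ")
--     if sep:
--         mode = MODE.get(head)
--         if mode is not None:
--             return mode, tail.strip()
--     return "auto", s
-- ===== Notes on version B (the rewrite author's own statement) =====
-- stated objective: idiomatic
-- what changed: A scans six hard-coded space-terminated prefixes in two sequential loops with slicing; B tokenizes once with str.partition and looks the first token up in a keyword-to-mode dict, falling back to the automatic mode when there is no second token.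
import Mathlib
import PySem

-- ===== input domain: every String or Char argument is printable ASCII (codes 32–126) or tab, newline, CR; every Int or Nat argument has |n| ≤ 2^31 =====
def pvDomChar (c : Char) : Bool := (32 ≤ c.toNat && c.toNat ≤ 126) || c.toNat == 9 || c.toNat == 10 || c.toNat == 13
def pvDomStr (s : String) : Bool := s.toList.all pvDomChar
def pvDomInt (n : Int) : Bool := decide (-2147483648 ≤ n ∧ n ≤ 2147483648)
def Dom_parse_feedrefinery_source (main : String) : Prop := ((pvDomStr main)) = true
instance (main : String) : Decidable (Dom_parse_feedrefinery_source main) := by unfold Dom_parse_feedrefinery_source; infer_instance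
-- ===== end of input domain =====

-- B replaces A's two sequential prefix-scan loops by a single partition(' ') tokenization plus a
-- keyword->mode dict lookup (idiomatic; same O(n) cost).


-- ===== PORT A =====
-- the 'for prefix in (...): if s.startswith(prefix): return ... raw[len(prefix):].strip().lower()'
-- loop with early return, as structural recursion over the tuple of prefixes
def pvTryPrefixes (raw s : String) : List String → Option String
  | [] => none
  | p :: ps =>
    if PySem.Str.startswith s p then
      some (PySem.Str.lower (PySem.Str.strip (PySem.Str.slice raw (some (PySem.Str.len p)) none)))
    else pvTryPrefixes raw s ps

def parse_feedrefinery_source (main : String) : String × String :=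
  let raw := PySem.Str.strip main
  let s := PySem.Str.lower raw
  match pvTryPrefixes raw s ["shared ", "plant ", "bay "] with
  | some rest => ("shared", rest)
  | none =>
    match pvTryPrefixes raw s ["personal ", "silo ", "mine "] with
    | some rest => ("silo", rest)
    | none => ("auto", s)

-- ===== PORT B =====
def pvMODE : PySem.Dict String String :=
  ⟨[("shared", "shared"), ("plant", "shared"), ("bay", "shared"),
    ("personal", "silo"), ("silo", "silo"), ("mine", "silo")]⟩

-- s.partition(" ") ported by hand on code points (exact for this one-character separator:
-- head = everything before the first ' ', tail = everything after it; (s, no-sep, "") if absent)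
def pvPartitionSpace (s : String) : String × Bool × String :=
  let cs := s.toList
  let head := cs.takeWhile (fun c => c != ' ')
  if head.length < cs.length then
    (String.ofList head, true, String.ofList (cs.drop (head.length + 1)))
  else (s, false, "")

def parse_feedrefinery_source_alt (main : String) : String × String :=
  let s := PySem.Str.lower (PySem.Str.strip main)
  let r := pvPartitionSpace s
  if r.2.1 then
    match PySem.Dict.get? pvMODE r.1 with
    | some mode => (mode, PySem.Str.strip r.2.2)
    | none => ("auto", s)
  else ("auto", s)

-- ===== PRECONDITION & SPEC =====
def Spec_parse_feedrefinery_source (main : String) (out : String × String) : Prop := out = parse_feedrefinery_source_alt main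
instance (main : String) (out : String × String) : Decidable (Spec_parse_feedrefinery_source main out) := by unfold Spec_parse_feedrefinery_source; infer_instance

-- ===== CLAIM (what is proved, stated in full; the proofs are below) =====
def Claim_equal_parse_feedrefinery_source : Prop := ∀ (main : String), Dom_parse_feedrefinery_source main → Spec_parse_feedrefinery_source main (parse_feedrefinery_source main)

-- ===== LEMMAS AND PROOFS =====

-- lowercasing never changes whether a character is whitespace
theorem pv_isspace_lowerChar (c : Char) :
    PySem.Chars.isspace (PySem.Chars.lowerChar c) = PySem.Chars.isspace c := by
  by_cases h : PySem.Chars.isupper c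
  · have h65 : 'A' ≤ c ∧ c ≤ 'Z' := by simpa [PySem.Chars.isupper] using h
    have hn : 65 ≤ c.toNat ∧ c.toNat ≤ 90 := ⟨h65.1, h65.2⟩
    have hv : (Char.ofNat (c.toNat + 32)).toNat = c.toNat + 32 := by
      rw [Char.toNat_ofNat, if_pos (Or.inl (by omega))]
    have h1 : PySem.Chars.isspace c = false := by simp [PySem.Chars.isspace]; omega
    have h2 : PySem.Chars.isspace (Char.ofNat (c.toNat + 32)) = false := by
      simp [PySem.Chars.isspace, hv]; omega
    simp [PySem.Chars.lowerChar, h, h1, h2]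
  · simp [PySem.Chars.lowerChar, h]

theorem pv_strip_lower (l : List Char) :
    PySem.Chars.strip (PySem.Chars.lower l) = PySem.Chars.lower (PySem.Chars.strip l) := by
  have hp : (PySem.Chars.isspace ∘ PySem.Chars.lowerChar) = PySem.Chars.isspace :=
    funext pv_isspace_lowerChar
  simp [PySem.Chars.strip, PySem.Chars.lstrip, PySem.Chars.rstrip, PySem.Chars.lower,
        List.dropWhile_map, ← List.map_reverse, hp]

-- A's rest (slice the raw string, then strip, then lower) equals B's rest computed on the
-- already-lowercased string
theorem pv_rest_eq (rawl : List Char) (n : Nat) :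
    PySem.Chars.lower (PySem.Chars.strip (rawl.drop n)) =
    PySem.Chars.strip ((PySem.Chars.lower rawl).drop n) := by
  rw [show (PySem.Chars.lower rawl).drop n = PySem.Chars.lower (rawl.drop n) by
        simp [PySem.Chars.lower, List.map_drop],
      pv_strip_lower]

theorem pv_takeWhile_word (w r : List Char) (hw : ∀ c ∈ w, (c != ' ') = true) :
    (w ++ ' ' :: r).takeWhile (fun c => c != ' ') = w := by
  induction w with
  | nil => simp
  | cons a w ih =>
    simp [hw a (by simp), ih (fun c hc => hw c (by simp [hc]))]

-- forward: a 'keyword ' prefix of cs determines partition's head (and guarantees a separator)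
theorem pv_prefix_head (w cs : List Char) (hw : ∀ c ∈ w, (c != ' ') = true)
    (h : (w ++ [' ']) <+: cs) :
    cs.takeWhile (fun c => c != ' ') = w ∧ w.length < cs.length := by
  obtain ⟨r, rfl⟩ := h
  have : w ++ [' '] ++ r = w ++ ' ' :: r := by simp
  rw [this]
  refine ⟨pv_takeWhile_word w r hw, by simp⟩

theorem pv_dropWhile_head (p : Char → Bool) (l : List Char) (c : Char) (r : List Char)
    (h : l.dropWhile p = c :: r) : p c = false := by
  induction l with
  | nil => simp at h
  | cons a l ih =>
    by_cases hp : p a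
    · rw [List.dropWhile_cons_of_pos hp] at h; exact ih h
    · rw [List.dropWhile_cons_of_neg hp] at h
      obtain ⟨rfl, -⟩ := List.cons.injEq .. ▸ h
      simpa using hp

-- backward: if a separator exists, cs splits as head ++ ' ' ++ tail
theorem pv_space_split (cs : List Char)
    (h : (cs.takeWhile (fun c => c != ' ')).length < cs.length) :
    cs.takeWhile (fun c => c != ' ') ++ [' '] <+: cs := by
  have hsplit := List.takeWhile_append_dropWhile (p := fun c => c != ' ') (l := cs)
  cases hd : cs.dropWhile (fun c => c != ' ') with
  | nil =>
    exfalso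
    rw [hd, List.append_nil] at hsplit
    rw [hsplit] at h
    exact absurd h (lt_irrefl _)
  | cons c r =>
    have hc : (c != ' ') = false := pv_dropWhile_head _ cs c r hd
    have hc' : c = ' ' := by simpa using hc
    subst hc'
    refine ⟨r, ?_⟩
    rw [List.append_assoc, List.singleton_append, ← hd, hsplit]

-- A and B both reduce to this split on cs = main.strip().lower()
def pvCore (cs : List Char) : String × String :=
  if "shared ".toList <+: cs then ("shared", String.ofList (PySem.Chars.strip (cs.drop 7)))
  else if "plant ".toList <+: cs then ("shared", String.ofList (PySem.Chars.strip (cs.drop 6)))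
  else if "bay ".toList <+: cs then ("shared", String.ofList (PySem.Chars.strip (cs.drop 4)))
  else if "personal ".toList <+: cs then ("silo", String.ofList (PySem.Chars.strip (cs.drop 9)))
  else if "silo ".toList <+: cs then ("silo", String.ofList (PySem.Chars.strip (cs.drop 5)))
  else if "mine ".toList <+: cs then ("silo", String.ofList (PySem.Chars.strip (cs.drop 5)))
  else ("auto", String.ofList cs)

theorem pv_restStr (main : String) (n : Int) (hn : 0 ≤ n) :
    PySem.Str.lower (PySem.Str.strip (PySem.Str.slice (PySem.Str.strip main) (some n) none)) =
    String.ofList (PySem.Chars.strip ((PySem.Chars.lower (PySem.Chars.strip main.toList)).drop n.toNat)) := by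
  rw [← pv_rest_eq]
  simp [PySem.Str.lower, PySem.Str.strip, PySem.Str.slice, PySem.List.slice_from _ hn]

theorem pv_try1 (main : String) :
    (pvTryPrefixes (PySem.Str.strip main) (PySem.Str.lower (PySem.Str.strip main)) ["shared ", "plant ", "bay "]) =
    (if "shared ".toList <+: PySem.Chars.lower (PySem.Chars.strip main.toList) then some (String.ofList (PySem.Chars.strip ((PySem.Chars.lower (PySem.Chars.strip main.toList)).drop 7)))
     else if "plant ".toList <+: PySem.Chars.lower (PySem.Chars.strip main.toList) then some (String.ofList (PySem.Chars.strip ((PySem.Chars.lower (PySem.Chars.strip main.toList)).drop 6)))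
     else if "bay ".toList <+: PySem.Chars.lower (PySem.Chars.strip main.toList) then some (String.ofList (PySem.Chars.strip ((PySem.Chars.lower (PySem.Chars.strip main.toList)).drop 4)))
     else none) := by
  simp only [pvTryPrefixes, PySem.Str.startswith, PySem.Chars.startswith,
    show PySem.Str.len "shared " = 7 from by decide, show PySem.Str.len "plant " = 6 from by decide,
    show PySem.Str.len "bay " = 4 from by decide]
  rw [pv_restStr main 7 (by norm_num), pv_restStr main 6 (by norm_num), pv_restStr main 4 (by norm_num)]
  simp [List.isPrefixOf_iff_prefix]
  split_ifs <;> rfl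

theorem pv_try2 (main : String) :
    (pvTryPrefixes (PySem.Str.strip main) (PySem.Str.lower (PySem.Str.strip main)) ["personal ", "silo ", "mine "]) =
    (if "personal ".toList <+: PySem.Chars.lower (PySem.Chars.strip main.toList) then some (String.ofList (PySem.Chars.strip ((PySem.Chars.lower (PySem.Chars.strip main.toList)).drop 9)))
     else if "silo ".toList <+: PySem.Chars.lower (PySem.Chars.strip main.toList) then some (String.ofList (PySem.Chars.strip ((PySem.Chars.lower (PySem.Chars.strip main.toList)).drop 5)))
     else if "mine ".toList <+: PySem.Chars.lower (PySem.Chars.strip main.toList) then some (String.ofList (PySem.Chars.strip ((PySem.Chars.lower (PySem.Chars.strip main.toList)).drop 5)))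
     else none) := by
  simp only [pvTryPrefixes, PySem.Str.startswith, PySem.Chars.startswith,
    show PySem.Str.len "personal " = 9 from by decide, show PySem.Str.len "silo " = 5 from by decide,
    show PySem.Str.len "mine " = 5 from by decide]
  rw [pv_restStr main 9 (by norm_num), pv_restStr main 5 (by norm_num)]
  simp [List.isPrefixOf_iff_prefix]
  split_ifs <;> rfl

set_option maxHeartbeats 2000000 in
theorem pv_A_repr (main : String) :
    parse_feedrefinery_source main =
    pvCore (PySem.Chars.lower (PySem.Chars.strip main.toList)) := by
  simp only [parse_feedrefinery_source]
  rw [pv_try1 main, pv_try2 main]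
  simp only [pvCore]
  split_ifs <;> simp [PySem.Str.lower, PySem.Str.strip]

set_option maxHeartbeats 1000000 in
theorem pv_B_repr (main : String) :
    parse_feedrefinery_source_alt main =
    pvCore (PySem.Chars.lower (PySem.Chars.strip main.toList)) := by
  have hs : (PySem.Str.lower (PySem.Str.strip main)).toList =
      PySem.Chars.lower (PySem.Chars.strip main.toList) := by simp
  have hofl : String.ofList (PySem.Chars.lower (PySem.Chars.strip main.toList)) =
      PySem.Str.lower (PySem.Str.strip main) := by
    rw [← hs, String.ofList_toList]
  unfold parse_feedrefinery_source_alt pvPartitionSpace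
  dsimp only
  rw [hs]
  set cs := PySem.Chars.lower (PySem.Chars.strip main.toList) with hcs
  by_cases h1 : "shared ".toList <+: cs
  · have h1' : ['s', 'h', 'a', 'r', 'e', 'd', ' '] <+: cs := by simpa using h1
    obtain ⟨hh, hl⟩ := pv_prefix_head ['s', 'h', 'a', 'r', 'e', 'd'] cs (by simp)
      (by rw [show ['s', 'h', 'a', 'r', 'e', 'd'] ++ [' '] = ['s', 'h', 'a', 'r', 'e', 'd', ' '] from rfl]; exact h1')
    rw [hh, if_pos hl]
    dsimp only
    rw [show String.ofList ['s', 'h', 'a', 'r', 'e', 'd'] = "shared" from by decide,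
        show pvMODE.get? "shared" = some "shared" from by decide]
    simp [pvCore, h1', PySem.Str.strip]
  · have h1' : ¬ ['s', 'h', 'a', 'r', 'e', 'd', ' '] <+: cs := by simpa using h1
    by_cases h2 : "plant ".toList <+: cs
    · have h2' : ['p', 'l', 'a', 'n', 't', ' '] <+: cs := by simpa using h2
      obtain ⟨hh, hl⟩ := pv_prefix_head ['p', 'l', 'a', 'n', 't'] cs (by simp)
        (by rw [show ['p', 'l', 'a', 'n', 't'] ++ [' '] = ['p', 'l', 'a', 'n', 't', ' '] from rfl]; exact h2')
      rw [hh, if_pos hl]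
      dsimp only
      rw [show String.ofList ['p', 'l', 'a', 'n', 't'] = "plant" from by decide,
          show pvMODE.get? "plant" = some "shared" from by decide]
      simp [pvCore, h1', h2', PySem.Str.strip]
    · have h2' : ¬ ['p', 'l', 'a', 'n', 't', ' '] <+: cs := by simpa using h2
      by_cases h3 : "bay ".toList <+: cs
      · have h3' : ['b', 'a', 'y', ' '] <+: cs := by simpa using h3
        obtain ⟨hh, hl⟩ := pv_prefix_head ['b', 'a', 'y'] cs (by simp)
          (by rw [show ['b', 'a', 'y'] ++ [' '] = ['b', 'a', 'y', ' '] from rfl]; exact h3')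
        rw [hh, if_pos hl]
        dsimp only
        rw [show String.ofList ['b', 'a', 'y'] = "bay" from by decide,
            show pvMODE.get? "bay" = some "shared" from by decide]
        simp [pvCore, h1', h2', h3', PySem.Str.strip]
      · have h3' : ¬ ['b', 'a', 'y', ' '] <+: cs := by simpa using h3
        by_cases h4 : "personal ".toList <+: cs
        · have h4' : ['p', 'e', 'r', 's', 'o', 'n', 'a', 'l', ' '] <+: cs := by simpa using h4
          obtain ⟨hh, hl⟩ := pv_prefix_head ['p', 'e', 'r', 's', 'o', 'n', 'a', 'l'] cs (by simp)
            (by rw [show ['p', 'e', 'r', 's', 'o', 'n', 'a', 'l'] ++ [' '] = ['p', 'e', 'r', 's', 'o', 'n', 'a', 'l', ' '] from rfl]; exact h4')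
          rw [hh, if_pos hl]
          dsimp only
          rw [show String.ofList ['p', 'e', 'r', 's', 'o', 'n', 'a', 'l'] = "personal" from by decide,
              show pvMODE.get? "personal" = some "silo" from by decide]
          simp [pvCore, h1', h2', h3', h4', PySem.Str.strip]
        · have h4' : ¬ ['p', 'e', 'r', 's', 'o', 'n', 'a', 'l', ' '] <+: cs := by simpa using h4
          by_cases h5 : "silo ".toList <+: cs
          · have h5' : ['s', 'i', 'l', 'o', ' '] <+: cs := by simpa using h5
            obtain ⟨hh, hl⟩ := pv_prefix_head ['s', 'i', 'l', 'o'] cs (by simp)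
              (by rw [show ['s', 'i', 'l', 'o'] ++ [' '] = ['s', 'i', 'l', 'o', ' '] from rfl]; exact h5')
            rw [hh, if_pos hl]
            dsimp only
            rw [show String.ofList ['s', 'i', 'l', 'o'] = "silo" from by decide,
                show pvMODE.get? "silo" = some "silo" from by decide]
            simp [pvCore, h1', h2', h3', h4', h5', PySem.Str.strip]
          · have h5' : ¬ ['s', 'i', 'l', 'o', ' '] <+: cs := by simpa using h5
            by_cases h6 : "mine ".toList <+: cs
            · have h6' : ['m', 'i', 'n', 'e', ' '] <+: cs := by simpa using h6
              obtain ⟨hh, hl⟩ := pv_prefix_head ['m', 'i', 'n', 'e'] cs (by simp)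
                (by rw [show ['m', 'i', 'n', 'e'] ++ [' '] = ['m', 'i', 'n', 'e', ' '] from rfl]; exact h6')
              rw [hh, if_pos hl]
              dsimp only
              rw [show String.ofList ['m', 'i', 'n', 'e'] = "mine" from by decide,
                  show pvMODE.get? "mine" = some "silo" from by decide]
              simp [pvCore, h1', h2', h3', h4', h5', h6', PySem.Str.strip]
            · have h6' : ¬ ['m', 'i', 'n', 'e', ' '] <+: cs := by simpa using h6
              by_cases hl : (cs.takeWhile (fun c => c != ' ')).length < cs.length
              · have hpre := pv_space_split cs hl
                have mk : ∀ (kw kws : String), kws.toList = kw.toList ++ [' '] →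
                    ¬ (kws.toList <+: cs) →
                    ¬ ((kw == String.ofList (cs.takeWhile (fun c => c != ' '))) = true) := by
                  intro kw kws hes hnp
                  simp only [beq_iff_eq]
                  intro he
                  apply hnp
                  have hw : kw.toList = cs.takeWhile (fun c => c != ' ') := by
                    simpa using congrArg String.toList he
                  rw [hes, hw]
                  exact hpre
                have b1 := mk "shared" "shared " (by decide) h1
                have b2 := mk "plant" "plant " (by decide) h2
                have b3 := mk "bay" "bay " (by decide) h3
                have b4 := mk "personal" "personal " (by decide) h4
                have b5 := mk "silo" "silo " (by decide) h5
                have b6 := mk "mine" "mine " (by decide) h6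
                rw [if_pos hl]
                dsimp only [pvMODE, PySem.Dict.get?]
                have hfind : List.find? (fun p : String × String => p.1 == String.ofList (cs.takeWhile (fun c => c != ' ')))
                    [("shared", "shared"), ("plant", "shared"), ("bay", "shared"), ("personal", "silo"), ("silo", "silo"), ("mine", "silo")] = none := by
                  rw [List.find?_eq_none]
                  intro a ha
                  fin_cases ha
                  exacts [b1, b2, b3, b4, b5, b6]
                rw [hfind]
                simp [pvCore, h1', h2', h3', h4', h5', h6', hofl]
              · rw [if_neg hl]
                simp [pvCore, h1', h2', h3', h4', h5', h6', hofl]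

-- ===== VERDICT (by name: the statement is the Claim_ definition above) =====
theorem parse_feedrefinery_source_spec : Claim_equal_parse_feedrefinery_source := by
  intro main _
  show parse_feedrefinery_source main = parse_feedrefinery_source_alt main
  rw [pv_A_repr, pv_B_repr]
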